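-- pv_equiv track=rewrite | github.com/kienld3049/Single-Human-AoDai-Parser | get_grounded_sam_output.py | select_best_box
-- ===== SOURCE A (Python) =====
-- def select_best_box(point_list, box_list):
--     best_box = None
--     max_points = 0
--     min_area = float('inf')
--
--     for box in box_list:
--         x_min, y_min, x_max, y_max = box
--         points_inside = sum([
--             (x_min <= x <= x_max and y_min <= y <= y_max) for x, y in point_list
--         ])
--         area = (x_max - x_min) * (y_max - y_min)
--
--         if points_inside > max_points or (points_inside == max_points and area < min_area):
--             max_points = points_inside
--             min_area = area
--             best_box = box
--
--     return best_box
-- ===== SOURCE B (Python) =====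
-- def select_best_box(point_list, box_list):
--     # Swapped loop order: one pass over points updating per-box counters,
--     # then a single min() with a lexicographic (-count, area) key.
--     if not box_list:
--         return None
--     counts = [0] * len(box_list)
--     for px, py in point_list:
--         counts = [c + (x0 <= px <= x1 and y0 <= py <= y1)
--                   for c, (x0, y0, x1, y1) in zip(counts, box_list)]
--     return min(zip(box_list, counts),
--                key=lambda bc: (-bc[1], (bc[0][2] - bc[0][0]) * (bc[0][3] - bc[0][1])))[0]
-- ===== Notes on version B (the rewrite author's own statement) =====
-- stated objective: alternative
-- what changed: Replaces A's running-best loop (recounting points per box with an inf-area sentinel) by a point-major pass that builds all per-box counters at once, followed by a single min() with a lexicographic (-count, area) key.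
import Mathlib
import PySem

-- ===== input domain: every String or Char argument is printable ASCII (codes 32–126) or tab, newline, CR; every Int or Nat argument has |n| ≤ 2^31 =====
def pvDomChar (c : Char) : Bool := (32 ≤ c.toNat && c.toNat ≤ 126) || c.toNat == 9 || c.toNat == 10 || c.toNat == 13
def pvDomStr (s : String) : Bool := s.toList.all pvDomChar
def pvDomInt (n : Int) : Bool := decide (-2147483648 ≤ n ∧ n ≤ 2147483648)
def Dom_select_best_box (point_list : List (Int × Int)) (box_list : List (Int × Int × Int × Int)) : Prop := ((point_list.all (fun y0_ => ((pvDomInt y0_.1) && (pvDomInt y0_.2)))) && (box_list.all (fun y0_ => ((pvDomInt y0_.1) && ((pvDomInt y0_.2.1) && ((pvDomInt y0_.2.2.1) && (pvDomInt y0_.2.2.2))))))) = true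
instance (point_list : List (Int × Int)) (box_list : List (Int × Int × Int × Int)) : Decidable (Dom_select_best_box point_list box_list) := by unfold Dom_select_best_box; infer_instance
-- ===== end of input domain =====

-- B replaces A's running-best scan (per-box point recount + inf-area sentinel) by a
-- point-major counting pass followed by one min() with a lexicographic (-count, area) key;
-- objective: alternative (same cost, different decomposition).


-- ===== PORT A =====
-- min_area starts as float('inf') and is only ever compared with / overwritten by the
-- integer 'area': 'none' represents the float('inf') sentinel exactly (a < inf is true).
def pvAreaLtInf (a : Int) : Option Int → Bool
  | none => true
  | some m => a < m

def select_best_box (point_list : List (Int × Int)) (box_list : List (Int × Int × Int × Int)) : Option (Int × Int × Int × Int) :=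
  (box_list.foldl (fun st box =>
      let x_min := box.1; let y_min := box.2.1; let x_max := box.2.2.1; let y_max := box.2.2.2
      let points_inside : Int :=
        (point_list.map (fun p =>
          if x_min ≤ p.1 ∧ p.1 ≤ x_max ∧ y_min ≤ p.2 ∧ p.2 ≤ y_max then (1 : Int) else 0)).sum
      let area := (x_max - x_min) * (y_max - y_min)
      if points_inside > st.2.1 ∨ (points_inside = st.2.1 ∧ pvAreaLtInf area st.2.2) then
        (some box, points_inside, some area)
      else st)
    ((none, 0, none) : Option (Int × Int × Int × Int) × Int × Option Int)).1

-- ===== PORT B =====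
def select_best_box_alt (point_list : List (Int × Int)) (box_list : List (Int × Int × Int × Int)) : Option (Int × Int × Int × Int) :=
  match box_list with
  | [] => none
  | _ :: _ =>
    let counts : List Int :=
      point_list.foldl (fun cs p =>
          List.zipWith (fun c b =>
            c + (if b.1 ≤ p.1 ∧ p.1 ≤ b.2.2.1 ∧ b.2.1 ≤ p.2 ∧ p.2 ≤ b.2.2.2 then (1 : Int) else 0))
          cs box_list)
        (List.replicate box_list.length 0)
    (PySem.List.min2? (box_list.zip counts)
        (fun bc => -bc.2)
        (fun bc => (bc.1.2.2.1 - bc.1.1) * (bc.1.2.2.2 - bc.1.2.1))).map Prod.fst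

-- ===== PRECONDITION & SPEC =====
def Spec_select_best_box (point_list : List (Int × Int)) (box_list : List (Int × Int × Int × Int)) (out : Option (Int × Int × Int × Int)) : Prop := out = select_best_box_alt point_list box_list
instance (point_list : List (Int × Int)) (box_list : List (Int × Int × Int × Int)) (out : Option (Int × Int × Int × Int)) : Decidable (Spec_select_best_box point_list box_list out) := by unfold Spec_select_best_box; infer_instance

-- ===== CLAIM (what is proved, stated in full; the proofs are below) =====
def Claim_equal_select_best_box : Prop := ∀ (point_list : List (Int × Int)) (box_list : List (Int × Int × Int × Int)), Dom_select_best_box point_list box_list → Spec_select_best_box point_list box_list (select_best_box point_list box_list)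

-- ===== LEMMAS AND PROOFS =====

-- the point-in-box count, shared vocabulary of the proofs
def pvCnt (pts : List (Int × Int)) (b : Int × Int × Int × Int) : Int :=
  (pts.map (fun p => if b.1 ≤ p.1 ∧ p.1 ≤ b.2.2.1 ∧ b.2.1 ≤ p.2 ∧ p.2 ≤ b.2.2.2 then (1 : Int) else 0)).sum

def pvArea (b : Int × Int × Int × Int) : Int := (b.2.2.1 - b.1) * (b.2.2.2 - b.2.1)

lemma pvCnt_cons (p : Int × Int) (pts : List (Int × Int)) (b : Int × Int × Int × Int) :
    pvCnt (p :: pts) b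
      = (if b.1 ≤ p.1 ∧ p.1 ≤ b.2.2.1 ∧ b.2.1 ≤ p.2 ∧ p.2 ≤ b.2.2.2 then (1 : Int) else 0)
        + pvCnt pts b := by
  simp [pvCnt]

lemma pvCnt_nonneg (pts : List (Int × Int)) (b : Int × Int × Int × Int) : 0 ≤ pvCnt pts b := by
  induction pts with
  | nil => simp [pvCnt]
  | cons p t ih => rw [pvCnt_cons]; split <;> omega

lemma zipWith_map_self {α β : Type} (g : β → α → β) (f : α → β) (l : List α) :
    List.zipWith g (l.map f) l = l.map (fun b => g (f b) b) := by
  induction l with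
  | nil => rfl
  | cons x t ih => simp [ih]

-- the point-major counting loop computes pvCnt for every box
lemma counts_eq (boxes : List (Int × Int × Int × Int)) :
    ∀ (pts : List (Int × Int)) (f : (Int × Int × Int × Int) → Int),
      pts.foldl (fun cs p =>
          List.zipWith (fun c b =>
            c + (if b.1 ≤ p.1 ∧ p.1 ≤ b.2.2.1 ∧ b.2.1 ≤ p.2 ∧ p.2 ≤ b.2.2.2 then (1 : Int) else 0))
          cs boxes) (boxes.map f)
        = boxes.map (fun b => f b + pvCnt pts b) := by
  intro pts
  induction pts with
  | nil => intro f; simp [pvCnt]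
  | cons p t ih =>
    intro f
    simp only [List.foldl_cons, zipWith_map_self]
    rw [ih]
    refine List.map_congr_left (fun b _ => ?_)
    rw [pvCnt_cons]; ring

lemma zip_map_self {α β : Type} (g : α → β) (l : List α) :
    l.zip (l.map g) = l.map (fun x => (x, g x)) := by
  induction l with
  | nil => rfl
  | cons x t ih => simp [ih]

-- B's min2? step as a total function on (box, count) pairs
def pvStep2 (m x : (Int × Int × Int × Int) × Int) : (Int × Int × Int × Int) × Int :=
  if (decide (-x.2 < -m.2) || !decide (-m.2 < -x.2) && decide (pvArea x.1 < pvArea m.1)) = true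
  then x else m

lemma foldl_opt_some {a : Type} (f2 : a -> a -> a) (g : Option a -> a -> Option a)
    (hg : forall m x, g (some m) x = some (f2 m x)) (l : List a) :
    forall m, l.foldl g (some m) = some (l.foldl f2 m) := by
  induction l with
  | nil => intro m; rfl
  | cons x t ih => intro m; rw [List.foldl_cons, hg, ih, List.foldl_cons]

lemma step2_hg :
    ∀ (m x : (Int × Int × Int × Int) × Int),
      (if (decide (-x.2 < -m.2) ||
           !decide (-m.2 < -x.2) &&
           decide ((x.1.2.2.1 - x.1.1) * (x.1.2.2.2 - x.1.2.1) <
                   (m.1.2.2.1 - m.1.1) * (m.1.2.2.2 - m.1.2.1))) = true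
       then some x else some m)
      = some (pvStep2 m x) := by
  intro m x
  simp only [pvStep2, pvArea]
  rw [apply_ite some]
  rfl

-- A's running-best loop agrees with the total min2? fold over (box, pvCnt box) pairs
lemma fold_corr (pts : List (Int × Int)) (l : List (Int × Int × Int × Int)) :
    ∀ (b : Int × Int × Int × Int),
      l.foldl (fun st box =>
          if pvCnt pts box > st.2.1 ∨ (pvCnt pts box = st.2.1 ∧ pvAreaLtInf (pvArea box) st.2.2) then
            (some box, pvCnt pts box, some (pvArea box))
          else st)
        ((some b, pvCnt pts b, some (pvArea b)) :
          Option (Int × Int × Int × Int) × Int × Option Int)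
      = (fun m => (some m.1, m.2, some (pvArea m.1)))
          ((l.map (fun x => (x, pvCnt pts x))).foldl pvStep2 (b, pvCnt pts b)) := by
  induction l with
  | nil => intro b; rfl
  | cons x t ih =>
    intro b
    simp only [List.foldl_cons, List.map_cons]
    have hcond : (pvCnt pts x > pvCnt pts b ∨
        (pvCnt pts x = pvCnt pts b ∧ pvAreaLtInf (pvArea x) (some (pvArea b))))
        ↔ (decide (-(pvCnt pts x) < -(pvCnt pts b)) ||
           !decide (-(pvCnt pts b) < -(pvCnt pts x)) && decide (pvArea x < pvArea b)) = true := by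
      simp [pvAreaLtInf]
      constructor
      · rintro (h | ⟨h1, h2⟩)
        · left; omega
        · right; exact ⟨by omega, h2⟩
      · rintro (h | ⟨h1, h2⟩)
        · left; omega
        · by_cases hgt : pvCnt pts x > pvCnt pts b
          · left; exact hgt
          · right; exact ⟨by omega, h2⟩
    by_cases h : pvCnt pts x > pvCnt pts b ∨
        (pvCnt pts x = pvCnt pts b ∧ pvAreaLtInf (pvArea x) (some (pvArea b)))
    · rw [if_pos h, ih x]
      have : pvStep2 (b, pvCnt pts b) (x, pvCnt pts x) = (x, pvCnt pts x) := by
        simp only [pvStep2]; rw [if_pos (by simpa using hcond.mp h)]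
      rw [this]
    · rw [if_neg h, ih b]
      have : pvStep2 (b, pvCnt pts b) (x, pvCnt pts x) = (b, pvCnt pts b) := by
        simp only [pvStep2]
        rw [if_neg (by intro hc; exact h (hcond.mpr (by simpa using hc)))]
      rw [this]
  
-- ===== VERDICT (by name: the statement is the Claim_ definition above) =====
theorem select_best_box_spec : Claim_equal_select_best_box := by
  intro pts boxes _
  unfold Spec_select_best_box select_best_box select_best_box_alt
  cases boxes with
  | nil => rfl
  | cons b rest =>
    -- normalize A's loop body to the pvCnt / pvArea vocabulary
    have hbody : (fun (st : Option (Int × Int × Int × Int) × Int × Option Int)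
                      (box : Int × Int × Int × Int) =>
        let x_min := box.1; let y_min := box.2.1; let x_max := box.2.2.1; let y_max := box.2.2.2
        let points_inside : Int :=
          (pts.map (fun p =>
            if x_min ≤ p.1 ∧ p.1 ≤ x_max ∧ y_min ≤ p.2 ∧ p.2 ≤ y_max then (1 : Int) else 0)).sum
        let area := (x_max - x_min) * (y_max - y_min)
        if points_inside > st.2.1 ∨ (points_inside = st.2.1 ∧ pvAreaLtInf area st.2.2) then
          (some box, points_inside, some area)
        else st)
        = (fun st box =>
            if pvCnt pts box > st.2.1 ∨ (pvCnt pts box = st.2.1 ∧ pvAreaLtInf (pvArea box) st.2.2) then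
              (some box, pvCnt pts box, some (pvArea box))
            else st) := by
      funext st box; simp only [pvCnt, pvArea]
    rw [hbody]
    -- A's first iteration always installs the first box
    simp only [List.foldl_cons]
    have h0 : (if pvCnt pts b > (0:Int) ∨ (pvCnt pts b = 0 ∧ pvAreaLtInf (pvArea b) none) then
          ((some b, pvCnt pts b, some (pvArea b)) :
            Option (Int × Int × Int × Int) × Int × Option Int)
        else (none, 0, none))
        = (some b, pvCnt pts b, some (pvArea b)) := by
      rw [if_pos]
      have := pvCnt_nonneg pts b
      by_cases h : pvCnt pts b > 0
      · exact Or.inl h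
      · exact Or.inr ⟨by omega, by simp [pvAreaLtInf]⟩
    rw [h0, fold_corr pts rest b]
    -- B's side: counts are pvCnt, the zip is a map, min2? is the total fold
    have hrepl : List.replicate (b :: rest).length (0:Int)
        = (b :: rest).map (fun _ => (0:Int)) := by
      simp [List.map_const', List.replicate_succ]
    rw [hrepl, counts_eq (b :: rest) pts (fun _ => 0)]
    rw [zip_map_self (fun x => (0:Int) + pvCnt pts x) (b :: rest)]
    have hm : (b :: rest).map (fun x => (x, (0:Int) + pvCnt pts x))
        = (b :: rest).map (fun x => (x, pvCnt pts x)) := by simp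
    rw [hm]
    simp only [PySem.List.min2?, List.map_cons, List.foldl_cons]
    rw [foldl_opt_some pvStep2 _ (fun m x => step2_hg m x)]
    rfl
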